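-- pv_equiv track=rewrite | github.com/malindu-atu/Nyaya | backend/agent/guardrails.py | validate_against_sources
-- ===== SOURCE A (Python) =====
-- from typing import Dict, List, Tuple
--
-- def validate_against_sources(citations: List[str], sources: List[Dict]) -> Dict[str, bool]:
--     """Check each citation appears in source documents"""
--     validation = {}
--
--     for citation in citations:
--         found = False
--         for source in sources:
--             if citation.lower() in source.get("text", "").lower():
--                 found = True
--                 break
--         validation[citation] = found
--
--     return validation
-- ===== SOURCE B (Python) =====
-- def validate_against_sources(citations, sources):
--     """Check each citation appears in source documents.
--
--     Source-major scan: each source text is extracted and lowercased at most once,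
--     and the scan stops early once every distinct (lowered) citation is found."""
--     pending = list(dict.fromkeys(c.lower() for c in citations))
--     found = set()
--     for source in sources:
--         if not pending:
--             break
--         text = source.get("text", "").lower()
--         hit = [c for c in pending if c in text]
--         pending = [c for c in pending if c not in text]
--         found.update(hit)
--     return {c: c.lower() in found for c in citations}
-- ===== Notes on version B (the rewrite author's own statement) =====
-- stated objective: faster
-- what changed: B inverts the loop nesting: it scans sources (outer) against a shrinking worklist of distinct lowered citations (inner), lowercasing each source text at most once and breaking out of the source loop as soon as every citation is found, then answers all citations from the accumulated found-set; A scans citation-major, re-extracting and re-lowercasing every source text for every citation.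
import Mathlib
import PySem

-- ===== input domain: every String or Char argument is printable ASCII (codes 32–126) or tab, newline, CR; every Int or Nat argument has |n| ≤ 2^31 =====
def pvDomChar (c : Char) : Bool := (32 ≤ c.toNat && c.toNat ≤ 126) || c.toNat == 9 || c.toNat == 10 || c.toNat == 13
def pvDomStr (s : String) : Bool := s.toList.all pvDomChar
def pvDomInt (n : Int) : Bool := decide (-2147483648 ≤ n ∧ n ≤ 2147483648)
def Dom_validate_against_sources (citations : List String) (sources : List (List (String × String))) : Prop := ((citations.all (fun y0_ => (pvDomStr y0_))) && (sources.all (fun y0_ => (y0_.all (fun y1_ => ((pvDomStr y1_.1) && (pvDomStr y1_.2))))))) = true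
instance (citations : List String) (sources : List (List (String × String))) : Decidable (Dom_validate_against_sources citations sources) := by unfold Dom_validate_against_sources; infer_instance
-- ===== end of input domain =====

-- B inverts the loop nesting: a source-major scan over a shrinking worklist of distinct
-- lowered citations (each source text lowered at most once, early exit when all found),
-- then every citation is answered from the accumulated found-set.

-- ===== PORT A =====
-- inner 'for source in sources: … break' of A: first source whose lowered text contains the citation
def vasFoundA (citation : String) : List (List (String × String)) → Bool
  | [] => false
  | source :: rest =>
    if PySem.Str.isIn (PySem.Str.lower citation)
        (PySem.Str.lower ((PySem.Dict.mk source).getD "text" "")) then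
      true
    else
      vasFoundA citation rest

def validate_against_sources (citations : List String) (sources : List (List (String × String))) : List (String × Bool) :=
  (citations.foldl
    (fun (validation : PySem.Dict String Bool) citation =>
      validation.insert citation (vasFoundA citation sources))
    PySem.Dict.empty).items

-- ===== PORT B =====
-- B's 'for source in sources:' loop with state (pending, found); 'if not pending: break'
def vasScanB : List (List (String × String)) → List String → PySem.Set String → PySem.Set String
  | [], _, found => found
  | source :: rest, pending, found =>
    if pending.isEmpty then found
    else
      let text := PySem.Str.lower ((PySem.Dict.mk source).getD "text" "")
      vasScanB rest (pending.filter (fun c => !(PySem.Str.isIn c text)))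
        (PySem.Set.update found (pending.filter (fun c => PySem.Str.isIn c text)))

def validate_against_sources_alt (citations : List String) (sources : List (List (String × String))) : List (String × Bool) :=
  let pending := PySem.List.dedup (citations.map PySem.Str.lower)
  let found := vasScanB sources pending PySem.Set.empty
  (citations.foldl
    (fun (d : PySem.Dict String Bool) c =>
      d.insert c (PySem.Set.contains found (PySem.Str.lower c)))
    PySem.Dict.empty).items

-- ===== PRECONDITION & SPEC =====
def Spec_validate_against_sources (citations : List String) (sources : List (List (String × String))) (out : List (String × Bool)) : Prop := out = validate_against_sources_alt citations sources
instance (citations : List String) (sources : List (List (String × String))) (out : List (String × Bool)) : Decidable (Spec_validate_against_sources citations sources out) := by unfold Spec_validate_against_sources; infer_instance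

-- ===== CLAIM (what is proved, stated in full; the proofs are below) =====
def Claim_equal_validate_against_sources : Prop := ∀ (citations : List String) (sources : List (List (String × String))), Dom_validate_against_sources citations sources → Spec_validate_against_sources citations sources (validate_against_sources citations sources)

-- ===== LEMMAS AND PROOFS =====

-- membership in B's found-set after the scan: found before, or pending and contained in some source
theorem mem_vasScanB (sources : List (List (String × String))) :
    ∀ (pending : List String) (found : PySem.Set String) (c : String),
      c ∈ vasScanB sources pending found ↔
        c ∈ found ∨ (c ∈ pending ∧ ∃ s ∈ sources,
          PySem.Str.isIn c (PySem.Str.lower ((PySem.Dict.mk s).getD "text" "")) = true) := by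
  induction sources with
  | nil => intro pending found c; simp [vasScanB]
  | cons source rest ih =>
    intro pending found c
    simp only [vasScanB]
    split_ifs with hp
    · have : pending = [] := List.isEmpty_iff.mp hp
      subst this; simp
    · rw [ih]
      simp only [PySem.Set.mem_update, List.mem_filter, List.mem_cons]
      by_cases hin : PySem.Str.isIn c
          (PySem.Str.lower ((PySem.Dict.mk source).getD "text" "")) = true
      · constructor
        · rintro (⟨h | ⟨hc, _⟩⟩ | ⟨⟨hc, hni⟩, hrest⟩)
          · exact Or.inl h
          · exact Or.inr ⟨hc, source, Or.inl rfl, hin⟩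
          · rw [hin] at hni; exact absurd hni (by decide)
        · rintro (h | ⟨hc, s, hs, hsin⟩)
          · exact Or.inl (Or.inl h)
          · exact Or.inl (Or.inr ⟨hc, hin⟩)
      · constructor
        · rintro (⟨h | ⟨_, hi⟩⟩ | ⟨⟨hc, _⟩, s, hs, hsin⟩)
          · exact Or.inl h
          · exact absurd hi hin
          · exact Or.inr ⟨hc, s, Or.inr hs, hsin⟩
        · rintro (h | ⟨hc, s, hs, hsin⟩)
          · exact Or.inl (Or.inl h)
          · rcases hs with rfl | hs
            · exact absurd hsin hin
            · refine Or.inr ⟨⟨hc, ?_⟩, s, hs, hsin⟩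
              rw [Bool.not_eq_true] at hin
              rw [hin]; rfl

-- A's break-on-first-hit scan as an existential over sources
theorem vasFoundA_eq_any (citation : String) (sources : List (List (String × String))) :
    vasFoundA citation sources = true ↔
      ∃ s ∈ sources, PySem.Str.isIn (PySem.Str.lower citation)
        (PySem.Str.lower ((PySem.Dict.mk s).getD "text" "")) = true := by
  induction sources with
  | nil => simp [vasFoundA]
  | cons source rest ih =>
    simp only [vasFoundA]
    split_ifs with h
    · exact ⟨fun _ => ⟨source, by simp, h⟩, fun _ => rfl⟩
    · simp only [List.mem_cons, ih]
      constructor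
      · rintro ⟨s, hs, hsin⟩; exact ⟨s, Or.inr hs, hsin⟩
      · rintro ⟨s, rfl | hs, hsin⟩
        · exact absurd hsin h
        · exact ⟨s, hs, hsin⟩

-- the per-citation value A computes equals B's found-set lookup, for any citation of the list
theorem vasValue_eq (citations : List String) (sources : List (List (String × String)))
    (c : String) (hc : c ∈ citations) :
    vasFoundA c sources =
      PySem.Set.contains
        (vasScanB sources (PySem.List.dedup (citations.map PySem.Str.lower)) PySem.Set.empty)
        (PySem.Str.lower c) := by
  have hpend : PySem.Str.lower c ∈ PySem.List.dedup (citations.map PySem.Str.lower) := by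
    rw [PySem.List.mem_dedup]; exact List.mem_map_of_mem hc
  by_cases hA : vasFoundA c sources = true
  · rw [hA]
    symm
    rw [PySem.Set.contains_iff, mem_vasScanB]
    exact Or.inr ⟨hpend, (vasFoundA_eq_any c sources).mp hA⟩
  · rw [Bool.not_eq_true] at hA
    rw [hA]
    symm
    rw [Bool.eq_false_iff, Ne, PySem.Set.contains_iff, mem_vasScanB]
    rintro (h | ⟨_, hex⟩)
    · simp [PySem.Set.empty] at h
    · exact absurd ((vasFoundA_eq_any c sources).mpr hex) (by simp [hA])

-- ===== VERDICT (by name: the statement is the Claim_ definition above) =====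
theorem validate_against_sources_spec : Claim_equal_validate_against_sources := by
  intro citations sources _
  unfold Spec_validate_against_sources validate_against_sources validate_against_sources_alt
  congr 1
  exact PySem.List.foldl_congr_mem citations _ _ _
    (fun d c hc => by rw [vasValue_eq citations sources c hc])
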